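-- pv_equiv track=rewrite | github.com/Y3bs/Jake | utils/utils.py | check_wallet_type
-- ===== SOURCE A (Python) =====
-- def check_wallet_type(select:str,type: str):
--     if select == 'vodafone':
--         num = '0125'
--         if not type.startswith('01') or type[2] not in num or not type[3:].isdigit():
--             return False
--     if select == 'instapay':
--         if not type.endswith('@instapay'):
--             return False
--     if select == 'visa':
--         if not type.isdigit():
--             return False
--         total = 0
--         reverse = type[::-1]
--
--         for i,digit in enumerate(reverse):
--             n = int(digit)
--             if i % 2 == 1:
--                 n *= 2
--                 if n > 9:
--                     n -=9
--             total += n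
--         return total % 10 == 0
--     return True
-- ===== SOURCE B (Python) =====
-- _DOUBLE = (0, 2, 4, 6, 8, 1, 3, 5, 7, 9)
--
--
-- def _luhn_sum(digits):
--     # left-to-right pair walk: in each pair the first digit is doubled
--     # (via the precomputed table), the second is kept.
--     total = 0
--     i = 0
--     while i + 1 < len(digits):
--         total += _DOUBLE[digits[i]] + digits[i + 1]
--         i += 2
--     if i < len(digits):
--         total += digits[i]
--     return total
--
--
-- def _valid_vodafone(type):
--     return type.startswith('01') and type[2] in '0125' and type[3:].isdigit()
--
--
-- def _valid_instapay(type):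
--     return type.endswith('@instapay')
--
--
-- def _valid_visa(type):
--     if not type.isdigit():
--         return False
--     digits = [int(c) for c in type]
--     if len(digits) % 2 == 1:
--         digits = [0] + digits   # pad to even length; a doubled leading 0 adds nothing
--     return _luhn_sum(digits) % 10 == 0
--
--
-- _VALIDATORS = {'vodafone': _valid_vodafone, 'instapay': _valid_instapay, 'visa': _valid_visa}
--
--
-- def check_wallet_type(select: str, type: str):
--     validator = _VALIDATORS.get(select)
--     return validator(type) if validator is not None else True
-- ===== Notes on version B (the rewrite author's own statement) =====
-- stated objective: alternative
-- what changed: the if-chain dispatch becomes a validator lookup table, and the visa Luhn check replaces reverse+enumerate+parity-branch+(-9 correction) by padding the digit list to even length and a left-to-right pair recursion that doubles via a precomputed 10-entry table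
import Mathlib
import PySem

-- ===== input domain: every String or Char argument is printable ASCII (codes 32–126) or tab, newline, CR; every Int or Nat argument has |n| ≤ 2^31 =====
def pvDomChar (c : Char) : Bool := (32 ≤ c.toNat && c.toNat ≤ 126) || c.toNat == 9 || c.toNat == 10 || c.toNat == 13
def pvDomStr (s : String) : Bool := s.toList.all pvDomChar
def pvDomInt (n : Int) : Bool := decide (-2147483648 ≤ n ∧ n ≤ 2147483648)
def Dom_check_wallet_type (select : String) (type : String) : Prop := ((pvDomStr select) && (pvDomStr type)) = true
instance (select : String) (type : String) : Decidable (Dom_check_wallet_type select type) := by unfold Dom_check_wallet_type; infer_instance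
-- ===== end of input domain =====

-- B replaces A's if-chain by a validator lookup table and A's reverse+enumerate+parity Luhn loop by
-- padding the digit list to even length and a left-to-right pair recursion with a doubled-digit table
-- (objective: alternative decomposition, same cost).

-- ===== PORT A =====
def check_wallet_type (select : String) (type : String) : Bool :=
  let t := type.toList
  if select == "vodafone" &&
      (!(PySem.Chars.startswith t ("01".toList)) ||
       !(PySem.Chars.isIn [PySem.List.pyGetD t 2 ' '] ("0125".toList)) ||   -- type[2]: in range under Pre_
       !(PySem.Chars.strIsdigit (PySem.List.slice t (some 3) none))) then
    false
  else if select == "instapay" && !(PySem.Chars.endswith t ("@instapay".toList)) then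
    false
  else if select == "visa" then
    if !(PySem.Chars.strIsdigit t) then false
    else
      let reverse := (PySem.List.slice? t none none (-1)).getD []   -- type[::-1]; step -1 ≠ 0, always some
      let total := (PySem.List.enumerate reverse 0).foldl
        (fun total p =>
          let n := (PySem.Int.ofChars? [p.2]).getD 0   -- int(digit); succeeds: isdigit passed
          let n := if PySem.Int.mod p.1 2 == 1 then
                     (if 2 * n > 9 then 2 * n - 9 else 2 * n) else n
          total + n) 0
      PySem.Int.mod total 10 == 0
  else true

-- ===== PORT B =====
-- _DOUBLE: the doubled digit 0..9 with the -9 correction precomputed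
def pyLuhnDouble : List Int := [0, 2, 4, 6, 8, 1, 3, 5, 7, 9]

-- _luhn_sum: left-to-right pair walk, first of each pair doubled via the table
def luhnSumLoopB (digits : List Int) (i : Nat) (total : Int) : Int :=
  if i + 1 < digits.length then
    luhnSumLoopB digits (i + 2)
      (total + (PySem.List.pyGetD pyLuhnDouble (digits.getD i 0) 0 + digits.getD (i + 1) 0))
      -- _DOUBLE[digits[i]]: a digit value, in range; digits[i], digits[i+1]: i+1 < len
  else if i < digits.length then total + digits.getD i 0
  else total
termination_by digits.length - i

def validVodafone (type : String) : Bool :=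
  PySem.Chars.startswith type.toList ("01".toList) &&
  PySem.Chars.isIn [PySem.List.pyGetD type.toList 2 ' '] ("0125".toList) &&   -- type[2]: in range under Pre_
  PySem.Chars.strIsdigit (PySem.List.slice type.toList (some 3) none)

def validInstapay (type : String) : Bool :=
  PySem.Chars.endswith type.toList ("@instapay".toList)

def validVisa (type : String) : Bool :=
  if !(PySem.Chars.strIsdigit type.toList) then false
  else
    let digits := type.toList.map (fun c => (PySem.Int.ofChars? [c]).getD 0)   -- int(c); succeeds: isdigit passed
    let digits := if PySem.Int.mod (PySem.List.len digits) 2 == 1 then 0 :: digits else digits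
    PySem.Int.mod (luhnSumLoopB digits 0 0) 10 == 0

def pyValidators : PySem.Dict String (String → Bool) :=
  ((PySem.Dict.empty.insert "vodafone" validVodafone).insert "instapay" validInstapay).insert
    "visa" validVisa

def check_wallet_type_alt (select : String) (type : String) : Bool :=
  match pyValidators.get? select with
  | some f => f type
  | none => true

-- ===== PRECONDITION & SPEC =====
-- Pre_ excludes exactly the inputs where A (and B) raise IndexError: select 'vodafone' with a
-- two-character type starting '01', where type[2] is evaluated out of range.
def Pre_check_wallet_type (select : String) (type : String) : Prop :=
  ¬ (select = "vodafone" ∧ PySem.Chars.startswith type.toList ("01".toList) = true ∧ type.toList.length = 2)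
instance (select : String) (type : String) : Decidable (Pre_check_wallet_type select type) := by
  unfold Pre_check_wallet_type; infer_instance

def pvWitness_check_wallet_type : String × String := ("vodafone", "0101")

def Spec_check_wallet_type (select : String) (type : String) (out : Bool) : Prop :=
  out = check_wallet_type_alt select type
instance (select : String) (type : String) (out : Bool) : Decidable (Spec_check_wallet_type select type out) := by
  unfold Spec_check_wallet_type; infer_instance

-- ===== CLAIM (what is proved, stated in full; the proofs are below) =====
def Claim_equal_check_wallet_type : Prop := ∀ (select : String) (type : String), Dom_check_wallet_type select type → Pre_check_wallet_type select type → Spec_check_wallet_type select type (check_wallet_type select type)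

-- ===== LEMMAS AND PROOFS =====

-- proof helper: B's pair walk as structural two-at-a-time recursion
def luhnSumB : List Int → Int
  | [] => 0
  | [d] => d
  | a :: b :: rest => PySem.List.pyGetD pyLuhnDouble a 0 + b + luhnSumB rest

theorem luhnSumLoopB_eq (xs : List Int) (i : Nat) (total : Int) :
    luhnSumLoopB xs i total = total + luhnSumB (xs.drop i) := by
  rw [luhnSumLoopB]
  split
  · rename_i h
    rw [luhnSumLoopB_eq xs (i + 2)]
    have hdrop : xs.drop i = xs[i] :: xs[i + 1] :: xs.drop (i + 2) := by
      rw [List.drop_eq_getElem_cons (by omega), List.drop_eq_getElem_cons (by omega)]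
    rw [hdrop]
    simp only [luhnSumB, List.getD_eq_getElem _ _ (by omega : i < xs.length),
      List.getD_eq_getElem _ _ (by omega : i + 1 < xs.length)]
    ring
  · rename_i h
    split
    · rename_i h2
      have hdrop : xs.drop i = [xs[i]] := by
        rw [List.drop_eq_getElem_cons h2, List.drop_eq_nil_of_le (by omega)]
      rw [hdrop]
      simp only [luhnSumB, List.getD_eq_getElem _ _ h2]
    · rename_i h2
      rw [List.drop_eq_nil_of_le (by omega)]
      simp [luhnSumB]
termination_by xs.length - i

-- B's parity padding, written out (rfl-equal to the inlined `if` in validVisa)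
def padB (xs : List Int) : List Int :=
  if PySem.Int.mod (PySem.List.len xs) 2 == 1 then 0 :: xs else xs

theorem padB_append_two (xs : List Int) (a b : Int) :
    padB (xs ++ [a, b]) = padB xs ++ [a, b] := by
  unfold padB
  have hmod : PySem.Int.mod (PySem.List.len (xs ++ [a, b])) 2 = PySem.Int.mod (PySem.List.len xs) 2 := by
    rw [PySem.Int.mod_eq_emod_of_pos (by norm_num), PySem.Int.mod_eq_emod_of_pos (by norm_num)]
    simp only [PySem.List.len_eq, List.length_append, List.length_cons, List.length_nil]
    push_cast; omega
  rw [hmod]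
  split <;> simp

theorem padB_even (xs : List Int) : (padB xs).length % 2 = 0 := by
  unfold padB
  split <;> rename_i h <;>
    rw [PySem.Int.mod_eq_emod_of_pos (by norm_num)] at h <;>
    simp only [PySem.List.len_eq, beq_iff_eq, List.length_cons] at h ⊢ <;> omega

theorem luhnSumB_append_two :
    ∀ (l : List Int), l.length % 2 = 0 → ∀ (a b : Int),
      luhnSumB (l ++ [a, b]) = luhnSumB l + (PySem.List.pyGetD pyLuhnDouble a 0 + b)
  | [], _, a, b => by simp [luhnSumB]
  | [x], h, a, b => by simp at h
  | x :: y :: rest, h, a, b => by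
      have hr : rest.length % 2 = 0 := by simp at h; omega
      simp only [List.cons_append, luhnSumB, luhnSumB_append_two rest hr a b]
      ring

theorem digit_val_range (c : Char) (h : PySem.Chars.isdigit c = true) :
    0 ≤ (PySem.Int.ofChars? [c]).getD 0 ∧ (PySem.Int.ofChars? [c]).getD 0 ≤ 9 := by
  simp only [PySem.Chars.isdigit, Bool.and_eq_true, decide_eq_true_eq] at h
  obtain ⟨h1, h2⟩ := h
  rw [Char.le_def, UInt32.le_iff_toNat_le] at h1 h2
  have h48 : 48 ≤ c.toNat := h1
  have h57 : c.toNat ≤ 57 := h2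
  have hcases : c.toNat = 48 ∨ c.toNat = 49 ∨ c.toNat = 50 ∨ c.toNat = 51 ∨ c.toNat = 52 ∨
      c.toNat = 53 ∨ c.toNat = 54 ∨ c.toNat = 55 ∨ c.toNat = 56 ∨ c.toNat = 57 := by omega
  have hofn : Char.ofNat c.toNat = c := Char.ofNat_toNat c
  rcases hcases with h | h | h | h | h | h | h | h | h | h <;>
    (rw [h] at hofn; rw [← hofn]; decide)

theorem corrB_eq (d : Int) (h0 : 0 ≤ d) (h9 : d ≤ 9) :
    PySem.List.pyGetD pyLuhnDouble d 0 = if 2 * d > 9 then 2 * d - 9 else 2 * d := by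
  interval_cases d <;> decide

-- A's enumerate/parity fold over the reversed digits, started at an even index, equals B's
-- padded left-to-right pair sum of the unreversed digit values.
theorem foldA_eq_luhnB :
    ∀ (rs : List Char) (s total : Int), s % 2 = 0 → (∀ c ∈ rs, PySem.Chars.isdigit c = true) →
      (PySem.List.enumerate rs s).foldl
        (fun total p =>
          let n := (PySem.Int.ofChars? [p.2]).getD 0
          let n := if PySem.Int.mod p.1 2 == 1 then
                     (if 2 * n > 9 then 2 * n - 9 else 2 * n) else n
          total + n) total
      = total + luhnSumB (padB (rs.reverse.map (fun c => (PySem.Int.ofChars? [c]).getD 0)))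
  | [], s, total, _, _ => by simp [PySem.List.enumerate_nil, padB, luhnSumB]
  | [c], s, total, hs, _ => by
      have h1 : (PySem.Int.mod s 2 == 1) = false := by
        simp [PySem.Int.mod, Int.fmod_eq_emod]; omega
      simp only [PySem.List.enumerate_cons, PySem.List.enumerate_nil, List.foldl_cons,
        List.foldl_nil, List.reverse_cons, List.reverse_nil, List.nil_append, List.map_cons,
        List.map_nil, h1, Bool.false_eq_true, if_false]
      simp [padB, luhnSumB, PySem.Int.mod,
        show PySem.List.pyGetD pyLuhnDouble 0 0 = 0 from by decide]
  | c :: d :: rest, s, total, hs, hdig => by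
      have h1 : (PySem.Int.mod s 2 == 1) = false := by
        simp [PySem.Int.mod, Int.fmod_eq_emod]; omega
      have h2 : (PySem.Int.mod (s + 1) 2 == 1) = true := by
        simp [PySem.Int.mod, Int.fmod_eq_emod]; omega
      have hd : PySem.Chars.isdigit d = true := hdig d (by simp)
      have hrest : ∀ c' ∈ rest, PySem.Chars.isdigit c' = true := fun c' hc' => hdig c' (by simp [hc'])
      have hrange := digit_val_range d hd
      have ih := foldA_eq_luhnB rest (s + 2)
        (total + (PySem.Int.ofChars? [c]).getD 0 +
          (if 2 * (PySem.Int.ofChars? [d]).getD 0 > 9 then 2 * (PySem.Int.ofChars? [d]).getD 0 - 9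
           else 2 * (PySem.Int.ofChars? [d]).getD 0)) (by omega) hrest
      have hrev : ((c :: d :: rest).reverse.map (fun c => (PySem.Int.ofChars? [c]).getD 0))
          = (rest.reverse.map (fun c => (PySem.Int.ofChars? [c]).getD 0)) ++
            [(PySem.Int.ofChars? [d]).getD 0, (PySem.Int.ofChars? [c]).getD 0] := by
        simp
      simp only [PySem.List.enumerate_cons, List.foldl_cons, h1, h2, Bool.false_eq_true, if_false,
        if_true]
      rw [hrev, padB_append_two, luhnSumB_append_two _ (padB_even _),
        corrB_eq _ hrange.1 hrange.2]
      rw [show s + 1 + 1 = s + 2 from by ring]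
      refine ih.trans ?_
      ring

theorem check_wallet_type_spec : Claim_equal_check_wallet_type := by
  intro select type _hdom _hpre
  unfold Spec_check_wallet_type check_wallet_type check_wallet_type_alt
  have hget : pyValidators.get? select =
      if select = "visa" then some validVisa
      else if select = "instapay" then some validInstapay
      else if select = "vodafone" then some validVodafone
      else none := by
    simp [pyValidators, PySem.Dict.get?_insert, PySem.Dict.get?_empty]
  rw [hget]
  by_cases h1 : select = "vodafone"
  · subst h1
    have e1 : (("vodafone" : String) = "visa") = False := by simp
    have e2 : (("vodafone" : String) = "instapay") = False := by simp
    simp only [e1, e2, if_false, if_true]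
    have b1 : (("vodafone" : String) == "vodafone") = true := by decide
    have b2 : (("vodafone" : String) == "instapay") = false := by decide
    have b3 : (("vodafone" : String) == "visa") = false := by decide
    simp only [b1, b2, b3, Bool.true_and, Bool.false_and, Bool.false_eq_true, if_false]
    unfold validVodafone
    cases PySem.Chars.startswith type.toList ("01".toList) <;>
      cases PySem.Chars.isIn [PySem.List.pyGetD type.toList 2 ' '] ("0125".toList) <;>
      cases PySem.Chars.strIsdigit (PySem.List.slice type.toList (some 3) none) <;> simp
  · by_cases h2 : select = "instapay"
    · subst h2
      have e1 : (("instapay" : String) = "visa") = False := by simp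
      simp only [e1, if_false, if_true]
      have b1 : (("instapay" : String) == "vodafone") = false := by decide
      have b2 : (("instapay" : String) == "instapay") = true := by decide
      have b3 : (("instapay" : String) == "visa") = false := by decide
      simp only [b1, b2, b3, Bool.true_and, Bool.false_and, Bool.false_eq_true, if_false]
      unfold validInstapay
      cases PySem.Chars.endswith type.toList ("@instapay".toList) <;> simp
    · by_cases h3 : select = "visa"
      · subst h3
        simp only [if_true]
        have b1 : (("visa" : String) == "vodafone") = false := by decide
        have b2 : (("visa" : String) == "instapay") = false := by decide
        have b3 : (("visa" : String) == "visa") = true := by decide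
        simp only [b1, b2, b3, Bool.false_and, Bool.false_eq_true, if_false, if_true]
        unfold validVisa
        cases hd : PySem.Chars.strIsdigit type.toList
        · simp
        · simp only [Bool.not_true, Bool.false_eq_true, if_false]
          have hrev : (PySem.List.slice? type.toList none none (-1)).getD [] = type.toList.reverse := by
            rw [PySem.List.slice?_none_none_neg_one]; rfl
          have hdig : ∀ c ∈ type.toList.reverse, PySem.Chars.isdigit c = true := by
            intro c hc
            rw [List.mem_reverse] at hc
            simp only [PySem.Chars.strIsdigit, Bool.and_eq_true, List.all_eq_true] at hd
            exact hd.2 c hc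
          rw [hrev, foldA_eq_luhnB type.toList.reverse 0 0 (by decide) hdig,
            luhnSumLoopB_eq]
          simp only [List.reverse_reverse, zero_add, List.drop_zero]
          rfl
      · have hb1 : (select == "vodafone") = false := by simp [h1]
        have hb2 : (select == "instapay") = false := by simp [h2]
        have hb3 : (select == "visa") = false := by simp [h3]
        simp [h1, h2, h3, hb1, hb2, hb3]
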